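-- pv_equiv track=rewrite | github.com/SunwoongH/algorithm | Programmers/Level2/더 맵게.py | solution
-- ===== SOURCE A (Python) =====
-- import heapq
--
-- def solution(scoville, K):
--     length = len(scoville)
--     heapq.heapify(scoville)
--     count = 0
--     while len(scoville) > 1 and scoville[0] < K:
--         count += 1
--         first = heapq.heappop(scoville)
--         second = heapq.heappop(scoville)
--         heapq.heappush(scoville, first + second * 2)
--     return count if scoville[0] >= K else -1
-- ===== SOURCE B (Python) =====
-- def solution(scoville, K):
--     xs = sorted(scoville)
--     count = 0
--     while len(xs) > 1 and xs[0] < K: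
--         v = xs[0] + xs[1] * 2
--         xs = xs[2:]
--         i = 0
--         while i < len(xs) and xs[i] < v:
--             i += 1
--         xs.insert(i, v)
--         count += 1
--     return count if xs[0] >= K else -1
-- ===== Notes on version B (the rewrite author's own statement) =====
-- stated objective: alternative
-- what changed: B keeps the collection as a sorted list (sort once, pop the two smallest from the front, insert the combined value at its ordered position) instead of A's binary heap via heapq; same greedy, same arithmetic and final check.
import Mathlib
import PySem

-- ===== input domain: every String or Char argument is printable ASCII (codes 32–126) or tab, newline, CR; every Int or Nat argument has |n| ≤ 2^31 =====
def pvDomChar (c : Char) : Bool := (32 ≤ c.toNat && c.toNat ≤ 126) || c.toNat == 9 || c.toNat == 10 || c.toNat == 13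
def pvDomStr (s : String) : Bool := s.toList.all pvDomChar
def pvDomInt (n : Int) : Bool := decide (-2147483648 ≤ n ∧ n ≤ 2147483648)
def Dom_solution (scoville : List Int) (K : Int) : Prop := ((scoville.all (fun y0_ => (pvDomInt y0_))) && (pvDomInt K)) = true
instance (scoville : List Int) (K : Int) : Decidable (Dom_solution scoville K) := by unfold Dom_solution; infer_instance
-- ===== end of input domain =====

-- B replaces A's binary heap by a sorted list with ordered insertion (same greedy, simpler code);
-- equivalence is about the RETURN value only: Python A heapifies its argument in place, B leaves it untouched.

-- ===== PORT A =====
-- A uses the heapq library; PySem has no heapq, so heapify/heappop/heappush are ported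
-- by hand below, step for step after CPython's heapq (_siftdown = bubble-up, _siftup =
-- sift-to-leaf-then-bubble-up); exact for integer elements.

-- CPython heapq._siftdown's while loop: bubble newitem up from pos towards startpos.
-- Structural recursion on a fuel bound (pos strictly decreases, so `pos` iterations
-- always suffice and the fuel-0 branch is never truncating); same computation.
def pvSiftdownLoopF (fuel : Nat) (heap : List Int) (startpos : Nat) (newitem : Int)
    (pos : Nat) : List Int × Nat :=
  match fuel with
  | 0 => (heap, pos)
  | fuel + 1 =>
    if startpos < pos then
      let parentpos := (pos - 1) / 2
      let parent := heap.getD parentpos 0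
      if newitem < parent then
        pvSiftdownLoopF fuel (heap.set pos parent) startpos newitem parentpos
      else (heap, pos)
    else (heap, pos)

def pvSiftdownLoop (heap : List Int) (startpos : Nat) (newitem : Int) (pos : Nat) :
    List Int × Nat :=
  pvSiftdownLoopF pos heap startpos newitem pos

-- CPython heapq._siftdown: final heap[pos] = newitem included.
def pvSiftdown (heap : List Int) (startpos pos : Nat) : List Int :=
  let newitem := heap.getD pos 0
  let hp := pvSiftdownLoop heap startpos newitem pos
  hp.1.set hp.2 newitem

-- CPython heapq._siftup's while loop: move the smaller child up until pos is a leaf.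
-- Structural recursion on a fuel bound (childpos strictly increases towards the length,
-- so `heap.length - childpos` iterations always suffice); same computation.
def pvSiftupLoopF (fuel : Nat) (heap : List Int) (pos childpos : Nat) : List Int × Nat :=
  match fuel with
  | 0 => (heap, pos)
  | fuel + 1 =>
    if childpos < heap.length then
      let childpos' := if childpos + 1 < heap.length ∧ ¬ (heap.getD childpos 0 < heap.getD (childpos + 1) 0)
        then childpos + 1 else childpos
      pvSiftupLoopF fuel (heap.set pos (heap.getD childpos' 0)) childpos' (2 * childpos' + 1)
    else (heap, pos)

def pvSiftupLoop (heap : List Int) (pos childpos : Nat) : List Int × Nat :=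
  pvSiftupLoopF (heap.length - childpos + 1) heap pos childpos

-- CPython heapq._siftup: sift to a leaf, write newitem, then _siftdown back up.
def pvSiftup (heap : List Int) (pos : Nat) : List Int :=
  let newitem := heap.getD pos 0
  let hp := pvSiftupLoop heap pos (2 * pos + 1)
  pvSiftdown (hp.1.set hp.2 newitem) pos hp.2

-- heapq.heappush: append then _siftdown(heap, 0, len-1).
def pvHeappush (heap : List Int) (item : Int) : List Int :=
  pvSiftdown (heap ++ [item]) 0 heap.length

-- heapq.heappop: pop the last element, move it to the root, _siftup(heap, 0);
-- A never calls it on an empty heap (the `none` branch is unreachable).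
def pvHeappop (heap : List Int) : Int × List Int :=
  match heap.getLast? with
  | none => (0, [])
  | some lastelt =>
    let rest := heap.dropLast
    if rest.isEmpty then (lastelt, [])
    else (rest.getD 0 0, pvSiftup (rest.set 0 lastelt) 0)

-- heapq.heapify: for i in reversed(range(n//2)): _siftup(heap, i).
def pvHeapifyAux (heap : List Int) (i : Nat) : List Int :=
  match i with
  | 0 => heap
  | i + 1 => pvHeapifyAux (pvSiftup heap i) i

def pvHeapify (heap : List Int) : List Int := pvHeapifyAux heap (heap.length / 2)

-- A's while loop. Structural recursion on a fuel bound (each combine step shortens the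
-- heap by one, so `heap.length` iterations always suffice); same computation.
def pvMainLoopF (fuel : Nat) (heap : List Int) (K : Int) (count : Int) : Int :=
  match fuel with
  | 0 => if heap.getD 0 0 ≥ K then count else -1
  | fuel + 1 =>
    if 1 < heap.length ∧ heap.getD 0 0 < K then
      let p1 := pvHeappop heap
      let p2 := pvHeappop p1.2
      pvMainLoopF fuel (pvHeappush p2.2 (p1.1 + p2.1 * 2)) K (count + 1)
    else if heap.getD 0 0 ≥ K then count else -1

def pvMainLoop (heap : List Int) (K : Int) (count : Int) : Int :=
  pvMainLoopF heap.length heap K count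

def solution (scoville : List Int) (K : Int) : Int :=
  let _length := scoville.length
  pvMainLoop (pvHeapify scoville) K 0

-- ===== PORT B =====
-- Source B's inner `while i < len(xs) and xs[i] < v` + `xs.insert(i, v)`: ordered insertion.
def pvInsertSorted (xs : List Int) (v : Int) : List Int :=
  match xs with
  | [] => [v]
  | x :: rest => if x < v then x :: pvInsertSorted rest v else v :: x :: rest

-- Source B's outer while loop. Structural recursion on a fuel bound (each step shortens the
-- list by one, so `xs.length` iterations always suffice); same computation.
def pvAltLoopF (fuel : Nat) (xs : List Int) (K : Int) (count : Int) : Int :=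
  match fuel with
  | 0 => if xs.getD 0 0 ≥ K then count else -1
  | fuel + 1 =>
    if 1 < xs.length ∧ xs.getD 0 0 < K then
      pvAltLoopF fuel (pvInsertSorted (xs.drop 2) (xs.getD 0 0 + xs.getD 1 0 * 2)) K (count + 1)
    else if xs.getD 0 0 ≥ K then count else -1

def pvAltLoop (xs : List Int) (K : Int) (count : Int) : Int :=
  pvAltLoopF xs.length xs K count

def solution_alt (scoville : List Int) (K : Int) : Int :=
  pvAltLoop (PySem.List.sorted scoville (fun x => x) false) K 0

-- ===== PRECONDITION & SPEC =====
-- Pre_ excludes only the empty list, on which Python A raises IndexError (scoville[0]).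
def Pre_solution (scoville : List Int) (K : Int) : Prop := scoville ≠ []
instance (scoville : List Int) (K : Int) : Decidable (Pre_solution scoville K) := by
  unfold Pre_solution; infer_instance

def pvWitness_solution : List Int × Int := ([1, 2, 3, 9, 10, 12], 7)

def Spec_solution (scoville : List Int) (K : Int) (out : Int) : Prop := out = solution_alt scoville K
instance (scoville : List Int) (K : Int) (out : Int) : Decidable (Spec_solution scoville K out) := by
  unfold Spec_solution; infer_instance

-- ===== CLAIM (what is proved, stated in full; the proofs are below) =====
def Claim_equal_solution : Prop := ∀ (scoville : List Int) (K : Int), Dom_solution scoville K → Pre_solution scoville K → Spec_solution scoville K (solution scoville K)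

-- ===== LEMMAS AND PROOFS =====

theorem pvSiftdownLoopF_length (fuel : Nat) : ∀ (heap : List Int) (s : Nat) (v : Int) (p : Nat),
    (pvSiftdownLoopF fuel heap s v p).1.length = heap.length := by
  induction fuel with
  | zero => intro heap s v p; rfl
  | succ fuel ih =>
    intro heap s v p
    simp only [pvSiftdownLoopF]
    split
    · split
      · rw [ih]; simp
      · rfl
    · rfl

theorem pvSiftdownLoop_length (heap : List Int) (s : Nat) (v : Int) (p : Nat) :
    (pvSiftdownLoop heap s v p).1.length = heap.length := pvSiftdownLoopF_length ..

theorem pvSiftupLoopF_length (fuel : Nat) : ∀ (heap : List Int) (p c : Nat),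
    (pvSiftupLoopF fuel heap p c).1.length = heap.length := by
  induction fuel with
  | zero => intro heap p c; rfl
  | succ fuel ih =>
    intro heap p c
    simp only [pvSiftupLoopF]
    split
    · rw [ih]; simp
    · rfl

theorem pvSiftupLoop_length (heap : List Int) (p c : Nat) :
    (pvSiftupLoop heap p c).1.length = heap.length := pvSiftupLoopF_length ..

theorem pvSiftup_length (heap : List Int) (p : Nat) :
    (pvSiftup heap p).length = heap.length := by
  simp [pvSiftup, pvSiftdown, pvSiftdownLoop_length, pvSiftupLoop_length]

theorem pvHeappop_length (heap : List Int) :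
    (pvHeappop heap).2.length = heap.length - 1 := by
  unfold pvHeappop
  match h : heap.getLast? with
  | none => simp [List.getLast?_eq_none_iff] at h; simp [h]
  | some x =>
    simp only []
    split
    · rename_i he
      simp only [List.isEmpty_iff] at he
      simp [show heap.length - 1 = 0 by
        have := congrArg List.length he; simp at this; omega]
    · rename_i he
      simp [pvSiftup_length, List.length_dropLast]

theorem pvHeappush_length (heap : List Int) (x : Int) :
    (pvHeappush heap x).length = heap.length + 1 := by
  simp [pvHeappush, pvSiftdown, pvSiftdownLoop_length]


-- == generic list lemmas ==
theorem pvGetD_set_self {l : List Int} {i : Nat} (hi : i < l.length) (a : Int) :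
    (l.set i a).getD i 0 = a := by
  simp [List.getD_eq_getElem?_getD, hi]

theorem pvGetD_set_ne {l : List Int} {i j : Nat} (h : i ≠ j) (a : Int) :
    (l.set i a).getD j 0 = l.getD j 0 := by
  simp [List.getD_eq_getElem?_getD, List.getElem?_set_ne h]

theorem pvSet_getD_self {l : List Int} {i : Nat} (hi : i < l.length) :
    l.set i (l.getD i 0) = l := by
  apply List.ext_getElem (by simp)
  intro n hn hn'
  rcases eq_or_ne i n with rfl | hne
  · simp [List.getD_eq_getElem?_getD, hn']
  · simp [List.getElem_set_ne hne]

theorem pvSet_set_perm {l : List Int} {i j : Nat} (a b : Int) (hij : i ≠ j)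
    (hi : i < l.length) (hj : j < l.length) :
    ((l.set i a).set j b).Perm ((l.set i b).set j a) := by
  induction l generalizing i j with
  | nil => simp at hi
  | cons x t ih =>
    cases i with
    | zero =>
      cases j with
      | zero => omega
      | succ j =>
        simp only [List.set_cons_zero, List.set_cons_succ]
        exact (((List.set_perm_cons_eraseIdx (by simpa using hj) b).cons a).trans
          (List.Perm.swap _ _ _)).trans
          (((List.set_perm_cons_eraseIdx (by simpa using hj) a).symm).cons b)
    | succ i =>
      cases j with
      | zero =>
        simp only [List.set_cons_zero, List.set_cons_succ]
        exact (((List.set_perm_cons_eraseIdx (by simpa using hi) a).cons b).trans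
          (List.Perm.swap _ _ _)).trans
          (((List.set_perm_cons_eraseIdx (by simpa using hi) b).symm).cons a)
      | succ j =>
        simp only [List.set_cons_succ]
        exact (ih (by omega) (by simpa using hi) (by simpa using hj)).cons x

-- == heap predicates ==
def HeapFrom (l : List Int) (s : Nat) : Prop :=
  ∀ j : Nat, 0 < j → j < l.length → s ≤ (j - 1) / 2 → l.getD ((j - 1) / 2) 0 ≤ l.getD j 0

def IsHeap (l : List Int) : Prop := HeapFrom l 0

-- s is an ancestor-or-self of p in the implicit binary-heap tree
def Anc (s p : Nat) : Prop :=
  if p ≤ s then p = s else Anc s ((p - 1) / 2)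
termination_by p
decreasing_by omega

theorem Anc_zero (p : Nat) : Anc 0 p := by
  induction p using Nat.strong_induction_on with
  | _ p ih =>
    unfold Anc
    split
    · omega
    · exact ih _ (by omega)

theorem Anc_le {s p : Nat} (h : Anc s p) : s ≤ p := by
  induction p using Nat.strong_induction_on with
  | _ p ih =>
    unfold Anc at h
    split at h
    · omega
    · exact le_trans (ih _ (by omega) h) (by omega)

theorem Anc_self (s : Nat) : Anc s s := by unfold Anc; simp

theorem Anc_parent {s p : Nat} (h : Anc s p) (hs : s < p) : Anc s ((p - 1) / 2) := by
  unfold Anc at h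
  split at h
  · omega
  · exact h

theorem Anc_child {s p c : Nat} (h : Anc s p) (hc : c = 2 * p + 1 ∨ c = 2 * p + 2) :
    Anc s c := by
  have hsp := Anc_le h
  unfold Anc
  split
  · omega
  · have : (c - 1) / 2 = p := by omega
    rw [this]; exact h

-- the state written back at the hole p is a heap when the loop stops at p
theorem pvSiftdownExit_heap (h : List Int) (s : Nat) (v : Int) (p : Nat)
    (hp : p < h.length) (hanc : Anc s p)
    (ha : ∀ j, 0 < j → j < h.length → s ≤ (j - 1) / 2 → j ≠ p →
      h.getD ((j - 1) / 2) 0 ≤ h.getD j 0)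
    (hb : ∀ c, c < h.length → (c = 2 * p + 1 ∨ c = 2 * p + 2) → v ≤ h.getD c 0)
    (hpar : s < p → h.getD ((p - 1) / 2) 0 ≤ v) :
    HeapFrom (h.set p v) s := by
  intro j hj0 hjn hs'
  rw [List.length_set] at hjn
  rcases eq_or_ne j p with rfl | hjp
  · -- edge into the hole
    have hq : (j - 1) / 2 ≠ j := by omega
    rw [pvGetD_set_self hp, pvGetD_set_ne hq.symm]
    have hsj : s < j := by
      have := Anc_le hanc
      rcases Nat.lt_or_ge s j with h1 | h1
      · exact h1
      · omega
    exact hpar hsj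
  · rcases eq_or_ne ((j - 1) / 2) p with hq | hq
    · -- edge out of the hole
      rw [hq, pvGetD_set_self hp, pvGetD_set_ne hjp.symm]
      exact hb j hjn (by omega)
    · rw [pvGetD_set_ne (Ne.symm hq), pvGetD_set_ne (Ne.symm hjp)]
      exact ha j hj0 hjn hs' hjp

theorem pvSiftdownLoopF_congr (f : Nat) : ∀ (f' : Nat) (h : List Int) (s : Nat) (v : Int)
    (p : Nat), p ≤ f → p ≤ f' → pvSiftdownLoopF f h s v p = pvSiftdownLoopF f' h s v p := by
  induction f with
  | zero =>
    intro f' h s v p hf hf'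
    have hp0 : p = 0 := by omega
    subst hp0
    cases f' with
    | zero => rfl
    | succ f' => simp [pvSiftdownLoopF]
  | succ f ih =>
    intro f' h s v p hf hf'
    cases f' with
    | zero =>
      have hp0 : p = 0 := by omega
      subst hp0
      simp [pvSiftdownLoopF]
    | succ f' =>
      simp only [pvSiftdownLoopF]
      by_cases h1 : s < p
      · simp only [if_pos h1]
        by_cases h2 : v < h.getD ((p - 1) / 2) 0
        · simp only [if_pos h2]
          exact ih f' _ s v _ (by omega) (by omega)
        · simp only [if_neg h2]
      · simp only [if_neg h1]

theorem pvSiftdownLoop_exit1 (h : List Int) (s : Nat) (v : Int) (p : Nat)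
    (hx : ¬ s < p) : pvSiftdownLoop h s v p = (h, p) := by
  show pvSiftdownLoopF p h s v p = (h, p)
  cases p with
  | zero => rfl
  | succ p => simp [pvSiftdownLoopF, hx]

theorem pvSiftdownLoop_exit2 (h : List Int) (s : Nat) (v : Int) (p : Nat)
    (hx : s < p) (h2 : ¬ v < h.getD ((p - 1) / 2) 0) : pvSiftdownLoop h s v p = (h, p) := by
  show pvSiftdownLoopF p h s v p = (h, p)
  cases p with
  | zero => rfl
  | succ p => simp only [pvSiftdownLoopF, if_pos hx, if_neg h2]

theorem pvSiftdownLoop_step (h : List Int) (s : Nat) (v : Int) (p : Nat)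
    (hx : s < p) (h2 : v < h.getD ((p - 1) / 2) 0) :
    pvSiftdownLoop h s v p =
      pvSiftdownLoop (h.set p (h.getD ((p - 1) / 2) 0)) s v ((p - 1) / 2) := by
  show pvSiftdownLoopF p h s v p =
    pvSiftdownLoopF ((p - 1) / 2) (h.set p (h.getD ((p - 1) / 2) 0)) s v ((p - 1) / 2)
  cases p with
  | zero => omega
  | succ p =>
    simp only [pvSiftdownLoopF, if_pos hx, if_pos h2]
    exact pvSiftdownLoopF_congr _ _ _ _ _ _ (by omega) (by omega)

theorem pvSiftdownLoop_spec (m : Nat) :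
    ∀ (h : List Int) (s : Nat) (v : Int) (p : Nat), p ≤ m →
    p < h.length → Anc s p →
    (∀ j, 0 < j → j < h.length → s ≤ (j - 1) / 2 → j ≠ p →
      h.getD ((j - 1) / 2) 0 ≤ h.getD j 0) →
    (∀ c, c < h.length → (c = 2 * p + 1 ∨ c = 2 * p + 2) → v ≤ h.getD c 0) →
    (∀ c, c < h.length → (c = 2 * p + 1 ∨ c = 2 * p + 2) → s < p →
      h.getD ((p - 1) / 2) 0 ≤ h.getD c 0) →
    (pvSiftdownLoop h s v p).1.length = h.length ∧
    (pvSiftdownLoop h s v p).2 < h.length ∧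
    ((pvSiftdownLoop h s v p).1.set (pvSiftdownLoop h s v p).2 v).Perm (h.set p v) ∧
    HeapFrom ((pvSiftdownLoop h s v p).1.set (pvSiftdownLoop h s v p).2 v) s := by
  induction m with
  | zero =>
    intro h s v p hm hp hanc ha hb hc
    have hp0 : p = 0 := by omega
    subst hp0
    have hs0 : s = 0 := by have := Anc_le hanc; omega
    subst hs0
    rw [pvSiftdownLoop_exit1 h 0 v 0 (by omega)]
    exact ⟨rfl, hp, List.Perm.refl _,
      pvSiftdownExit_heap h 0 v 0 hp hanc ha hb (by omega)⟩
  | succ m ih =>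
    intro h s v p hm hp hanc ha hb hc
    by_cases hsp : s < p
    · by_cases hlt : v < h.getD ((p - 1) / 2) 0
      · rw [pvSiftdownLoop_step h s v p hsp hlt]
        set pp := (p - 1) / 2 with hppdef
        set parent := h.getD pp 0 with hpardef
        have hppp : pp < p := by omega
        have hppn : pp < h.length := by omega
        have hppne : pp ≠ p := by omega
        have hanc' : Anc s pp := Anc_parent hanc hsp
        have hspp : s ≤ pp := Anc_le hanc'
        have hlen : (h.set p parent).length = h.length := List.length_set ..
        -- (a) at the parent
        have ha' : ∀ j, 0 < j → j < (h.set p parent).length → s ≤ (j - 1) / 2 → j ≠ pp →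
            (h.set p parent).getD ((j - 1) / 2) 0 ≤ (h.set p parent).getD j 0 := by
          intro j hj0 hjn hs' hjpp
          rw [hlen] at hjn
          rcases eq_or_ne j p with rfl | hjp
          · -- edge pp → p : both sides now hold `parent`
            rw [show (j - 1) / 2 = pp from rfl, pvGetD_set_ne hjpp, pvGetD_set_self hp]
          · rcases eq_or_ne ((j - 1) / 2) p with hq | hq
            · -- edge p → child j : old grandparent bound (hc)
              have hj2 : j = 2 * p + 1 ∨ j = 2 * p + 2 := by omega
              rw [hq, pvGetD_set_self hp, pvGetD_set_ne hjp.symm]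
              exact hc j hjn hj2 hsp
            · rw [pvGetD_set_ne (Ne.symm hq), pvGetD_set_ne (Ne.symm hjp)]
              exact ha j hj0 hjn hs' hjp
        -- (b) at the parent
        have hb' : ∀ c, c < (h.set p parent).length → (c = 2 * pp + 1 ∨ c = 2 * pp + 2) →
            v ≤ (h.set p parent).getD c 0 := by
          intro c hcn hcc
          rw [hlen] at hcn
          rcases eq_or_ne c p with rfl | hcp
          · rw [pvGetD_set_self hp]; exact le_of_lt hlt
          · rw [pvGetD_set_ne hcp.symm]
            have : h.getD pp 0 ≤ h.getD c 0 := by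
              have := ha c (by omega) hcn (by omega) hcp
              simpa [show (c - 1) / 2 = pp by omega] using this
            omega
        -- (c) at the parent
        have hc' : ∀ c, c < (h.set p parent).length → (c = 2 * pp + 1 ∨ c = 2 * pp + 2) →
            s < pp → (h.set p parent).getD ((pp - 1) / 2) 0 ≤ (h.set p parent).getD c 0 := by
          intro c hcn hcc hspp'
          rw [hlen] at hcn
          have hq' : (pp - 1) / 2 ≠ p := by omega
          have hsq' : s ≤ (pp - 1) / 2 := Anc_le (Anc_parent hanc' hspp')
          have hqpp : h.getD ((pp - 1) / 2) 0 ≤ h.getD pp 0 := by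
            have := ha pp (by omega) hppn (by simpa using hsq') hppne
            simpa using this
          rcases eq_or_ne c p with rfl | hcp
          · rw [pvGetD_set_ne hq'.symm, pvGetD_set_self hp]; exact hqpp
          · rw [pvGetD_set_ne hq'.symm, pvGetD_set_ne hcp.symm]
            have : h.getD pp 0 ≤ h.getD c 0 := by
              have := ha c (by omega) hcn (by omega) hcp
              simpa [show (c - 1) / 2 = pp by omega] using this
            omega
        obtain ⟨ih1, ih2, ih3, ih4⟩ := ih (h.set p parent) s v pp (by omega)
          (by rw [hlen]; exact hppn) hanc' ha' hb' hc'
        refine ⟨by rw [ih1, hlen], by rw [hlen] at ih2; exact ih2, ?_, ih4⟩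
        -- permutation bookkeeping
        have hswap : ((h.set p parent).set pp v).Perm ((h.set p v).set pp parent) :=
          pvSet_set_perm parent v (Ne.symm hppne) hp hppn
        have hnoop : (h.set p v).set pp parent = h.set p v := by
          have : (h.set p v).getD pp 0 = parent := by
            rw [pvGetD_set_ne hppne.symm]
          rw [← this]
          exact pvSet_getD_self (by rw [List.length_set]; exact hppn)
        exact ih3.trans (hswap.trans (by rw [hnoop]))
      · rw [pvSiftdownLoop_exit2 h s v p hsp hlt]
        exact ⟨rfl, hp, List.Perm.refl _,
          pvSiftdownExit_heap h s v p hp hanc ha hb (fun _ => by omega)⟩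
    · rw [pvSiftdownLoop_exit1 h s v p hsp]
      exact ⟨rfl, hp, List.Perm.refl _,
        pvSiftdownExit_heap h s v p hp hanc ha hb (fun hx => absurd hx hsp)⟩

theorem pvGetD_append {l : List Int} {k : Nat} (hk : k < l.length) (x : Int) :
    (l ++ [x]).getD k 0 = l.getD k 0 := by
  simp [List.getD_eq_getElem?_getD, List.getElem?_append_left hk]

theorem pvSiftdown_spec (l : List Int) (s p : Nat) (hp : p < l.length) (hanc : Anc s p)
    (ha : ∀ j, 0 < j → j < l.length → s ≤ (j - 1) / 2 → j ≠ p →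
      l.getD ((j - 1) / 2) 0 ≤ l.getD j 0)
    (hb : ∀ c, c < l.length → (c = 2 * p + 1 ∨ c = 2 * p + 2) → l.getD p 0 ≤ l.getD c 0)
    (hc : ∀ c, c < l.length → (c = 2 * p + 1 ∨ c = 2 * p + 2) → s < p →
      l.getD ((p - 1) / 2) 0 ≤ l.getD c 0) :
    (pvSiftdown l s p).length = l.length ∧ (pvSiftdown l s p).Perm l ∧
    HeapFrom (pvSiftdown l s p) s := by
  obtain ⟨h1, h2, h3, h4⟩ := pvSiftdownLoop_spec p l s (l.getD p 0) p (le_refl p)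
    hp hanc ha hb hc
  have hres : pvSiftdown l s p =
      (pvSiftdownLoop l s (l.getD p 0) p).1.set (pvSiftdownLoop l s (l.getD p 0) p).2
        (l.getD p 0) := rfl
  rw [hres]
  refine ⟨by rw [List.length_set]; exact h1, ?_, h4⟩
  exact h3.trans (by rw [pvSet_getD_self hp])

theorem pvHeappush_spec (h : List Int) (x : Int) (hh : IsHeap h) :
    (pvHeappush h x).Perm (x :: h) ∧ IsHeap (pvHeappush h x) := by
  have hp : h.length < (h ++ [x]).length := by simp
  obtain ⟨_, h2, h3⟩ := pvSiftdown_spec (h ++ [x]) 0 h.length hp (Anc_zero _)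
    (by
      intro j hj0 hjn hs hjp
      rw [List.length_append, List.length_singleton] at hjn
      have hjl : j < h.length := by omega
      rw [pvGetD_append (by omega) x, pvGetD_append hjl x]
      exact hh j hj0 hjl hs)
    (by intro c hcn hcc; simp at hcn; omega)
    (by intro c hcn hcc; simp at hcn; omega)
  exact ⟨h2.trans (List.perm_append_singleton x h), h3⟩

theorem pvSiftupLoopF_congr (f : Nat) : ∀ (f' : Nat) (h : List Int) (p c : Nat),
    h.length - c < f → h.length - c < f' → pvSiftupLoopF f h p c = pvSiftupLoopF f' h p c := by
  induction f with
  | zero => intro f' h p c hf; omega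
  | succ f ih =>
    intro f' h p c hf hf'
    cases f' with
    | zero => omega
    | succ f' =>
      simp only [pvSiftupLoopF]
      by_cases h1 : c < h.length
      · simp only [if_pos h1]
        set c' := if c + 1 < h.length ∧ ¬ (h.getD c 0 < h.getD (c + 1) 0) then c + 1 else c
          with hc'def
        have hcc' : c ≤ c' := by rw [hc'def]; split <;> omega
        apply ih f' _ c' (2 * c' + 1) <;> rw [List.length_set] <;> omega
      · simp only [if_neg h1]

theorem pvSiftupLoop_exit (h : List Int) (p c : Nat) (hx : ¬ c < h.length) :
    pvSiftupLoop h p c = (h, p) := by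
  show pvSiftupLoopF (h.length - c + 1) h p c = (h, p)
  simp [pvSiftupLoopF, hx]

theorem pvSiftupLoop_step (h : List Int) (p c : Nat) (hx : c < h.length) :
    pvSiftupLoop h p c =
      pvSiftupLoop
        (h.set p (h.getD (if c + 1 < h.length ∧ ¬ (h.getD c 0 < h.getD (c + 1) 0)
          then c + 1 else c) 0))
        (if c + 1 < h.length ∧ ¬ (h.getD c 0 < h.getD (c + 1) 0) then c + 1 else c)
        (2 * (if c + 1 < h.length ∧ ¬ (h.getD c 0 < h.getD (c + 1) 0) then c + 1 else c) + 1) := by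
  obtain ⟨n, hn⟩ : ∃ n, h.length - c + 1 = n + 1 := ⟨h.length - c, rfl⟩
  show pvSiftupLoopF (h.length - c + 1) h p c = _
  rw [hn]
  simp only [pvSiftupLoopF]
  rw [if_pos hx]
  show _ = pvSiftupLoopF _ _ _ _
  set c' := if c + 1 < h.length ∧ ¬ (h.getD c 0 < h.getD (c + 1) 0) then c + 1 else c
    with hc'def
  have hcc' : c ≤ c' := by rw [hc'def]; split <;> omega
  apply pvSiftupLoopF_congr <;> rw [List.length_set] <;> omega
theorem pvSiftupLoop_spec (m : Nat) :
    ∀ (h : List Int) (s pos : Nat), h.length - pos ≤ m →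
    pos < h.length → Anc s pos →
    (∀ j, 0 < j → j < h.length → s ≤ (j - 1) / 2 → j ≠ pos → (j - 1) / 2 ≠ pos →
      h.getD ((j - 1) / 2) 0 ≤ h.getD j 0) →
    (∀ c, c < h.length → (c = 2 * pos + 1 ∨ c = 2 * pos + 2) → s < pos →
      h.getD ((pos - 1) / 2) 0 ≤ h.getD c 0) →
    (pvSiftupLoop h pos (2 * pos + 1)).1.length = h.length ∧
    (pvSiftupLoop h pos (2 * pos + 1)).2 < h.length ∧
    h.length ≤ 2 * (pvSiftupLoop h pos (2 * pos + 1)).2 + 1 ∧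
    Anc s (pvSiftupLoop h pos (2 * pos + 1)).2 ∧
    (∀ v : Int, ((pvSiftupLoop h pos (2 * pos + 1)).1.set (pvSiftupLoop h pos (2 * pos + 1)).2 v).Perm
      (h.set pos v)) ∧
    (∀ j, 0 < j → j < h.length → s ≤ (j - 1) / 2 →
      j ≠ (pvSiftupLoop h pos (2 * pos + 1)).2 → (j - 1) / 2 ≠ (pvSiftupLoop h pos (2 * pos + 1)).2 →
      (pvSiftupLoop h pos (2 * pos + 1)).1.getD ((j - 1) / 2) 0 ≤
        (pvSiftupLoop h pos (2 * pos + 1)).1.getD j 0) := by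
  induction m with
  | zero => intro h s pos hm hp; omega
  | succ m ih =>
    intro h s pos hm hp hanc ha hc
    by_cases hcl : 2 * pos + 1 < h.length
    · rw [pvSiftupLoop_step h pos (2 * pos + 1) hcl]
      set c' := if 2 * pos + 1 + 1 < h.length ∧
          ¬ (h.getD (2 * pos + 1) 0 < h.getD (2 * pos + 1 + 1) 0)
        then 2 * pos + 1 + 1 else 2 * pos + 1 with hc'def
      have hc'mem : c' = 2 * pos + 1 ∨ c' = 2 * pos + 2 := by
        rw [hc'def]; split <;> omega
      have hc'n : c' < h.length := by
        rw [hc'def]; split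
        · omega
        · exact hcl
      have hc'pos : pos < c' := by omega
      have hmin : ∀ d, d < h.length → (d = 2 * pos + 1 ∨ d = 2 * pos + 2) →
          h.getD c' 0 ≤ h.getD d 0 := by
        intro d hdn hdc
        rw [hc'def]
        split
        · rename_i hcond
          have he : 2 * pos + 1 + 1 = 2 * pos + 2 := by omega
          rw [he] at hcond ⊢
          rcases hdc with rfl | rfl
          · omega
          · rfl
        · rename_i hcond
          rcases hdc with rfl | rfl
          · rfl
          · rcases Decidable.not_and_iff_or_not.mp hcond with h1 | h1
            · omega
            · rw [Decidable.not_not] at h1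
              exact le_of_lt h1
      set h' := h.set pos (h.getD c' 0) with hh'def
      have hlen : h'.length = h.length := List.length_set ..
      have hanc' : Anc s c' := Anc_child hanc hc'mem
      have hsc' : s ≤ c' := Anc_le hanc'
      have ha' : ∀ j, 0 < j → j < h'.length → s ≤ (j - 1) / 2 → j ≠ c' → (j - 1) / 2 ≠ c' →
          h'.getD ((j - 1) / 2) 0 ≤ h'.getD j 0 := by
        intro j hj0 hjn hs' hjc hqc
        rw [hlen] at hjn
        have hjpos : j ≠ pos ∨ j = pos := by tauto
        rcases eq_or_ne ((j - 1) / 2) pos with hq | hq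
        · -- j is a child of pos, j ≠ c'
          have hjp : j ≠ pos := by omega
          rw [hh'def, pvGetD_set_ne hjp.symm, hq, pvGetD_set_self hp]
          exact hmin j hjn (by omega)
        · rcases eq_or_ne j pos with rfl | hjp
          · -- edge into pos, now holding h[c']
            have hspos : s < j := by
              have hq2 : (j - 1) / 2 < j := by omega
              omega
            rw [hh'def, pvGetD_set_self hp, pvGetD_set_ne (by omega : j ≠ (j - 1) / 2)]
            exact hc c' hc'n hc'mem hspos
          · rw [hh'def, pvGetD_set_ne (Ne.symm hq), pvGetD_set_ne hjp.symm]
            exact ha j hj0 hjn hs' hjp hq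
      have hc2 : ∀ e, e < h'.length → (e = 2 * c' + 1 ∨ e = 2 * c' + 2) → s < c' →
          h'.getD ((c' - 1) / 2) 0 ≤ h'.getD e 0 := by
        intro e hen hec _
        rw [hlen] at hen
        have hcq : (c' - 1) / 2 = pos := by omega
        have hepos : e ≠ pos := by omega
        have heq : (e - 1) / 2 = c' := by omega
        rw [hcq, hh'def, pvGetD_set_self hp, pvGetD_set_ne hepos.symm]
        have := ha e (by omega) hen (by omega) (by omega) (by omega)
        rw [heq] at this
        exact this
      obtain ⟨ih1, ih2, ih3, ih4, ih5, ih6⟩ := ih h' s c'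
        (by rw [hlen]; omega) (by rw [hlen]; exact hc'n) hanc' ha' hc2
      rw [hlen] at ih1 ih2 ih3 ih6
      refine ⟨ih1, ih2, ih3, ih4, ?_, ih6⟩
      intro v
      have hswap : (h'.set c' v).Perm ((h.set pos v).set c' (h.getD c' 0)) :=
        pvSet_set_perm (h.getD c' 0) v (by omega) hp hc'n
      have hnoop : (h.set pos v).set c' (h.getD c' 0) = h.set pos v := by
        have hx : (h.set pos v).getD c' 0 = h.getD c' 0 := pvGetD_set_ne (by omega) v
        rw [← hx]
        exact pvSet_getD_self (by rw [List.length_set]; exact hc'n)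
      exact (ih5 v).trans (hswap.trans (by rw [hnoop]))
    · rw [pvSiftupLoop_exit h pos (2 * pos + 1) hcl]
      exact ⟨rfl, hp, by omega, hanc, fun v => List.Perm.refl _,
        fun j hj0 hjn hs' hjp hqp => ha j hj0 hjn hs' hjp hqp⟩

theorem pvSiftup_spec (l : List Int) (i : Nat) (hi : i < l.length)
    (hf : HeapFrom l (i + 1)) :
    (pvSiftup l i).length = l.length ∧ (pvSiftup l i).Perm l ∧ HeapFrom (pvSiftup l i) i := by
  obtain ⟨r1, r2, r3, r4, r5, r6⟩ := pvSiftupLoop_spec l.length l i i (by omega) hi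
    (Anc_self i)
    (by
      intro j hj0 hjn hs' hjp hqp
      exact hf j hj0 hjn (by omega))
    (by intro c hcn hcc hlt; omega)
  set v := l.getD i 0 with hvdef
  set r := pvSiftupLoop l i (2 * i + 1) with hrdef
  set X := r.1.set r.2 v with hXdef
  have hXlen : X.length = l.length := by rw [hXdef, List.length_set]; exact r1
  have hres : pvSiftup l i = pvSiftdown X i r.2 := rfl
  have hXr2 : X.getD r.2 0 = v := pvGetD_set_self (by rw [r1]; exact r2) v
  obtain ⟨d1, d2, d3⟩ := pvSiftdown_spec X i r.2 (by rw [hXlen]; exact r2) r4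
    (by
      intro j hj0 hjn hs' hjp
      rw [hXlen] at hjn
      have hqr : (j - 1) / 2 ≠ r.2 := by omega
      rw [hXdef, pvGetD_set_ne (Ne.symm hqr), pvGetD_set_ne (Ne.symm hjp)]
      exact r6 j hj0 hjn hs' hjp hqr)
    (by intro c hcn hcc; rw [hXlen] at hcn; omega)
    (by intro c hcn hcc hlt; rw [hXlen] at hcn; omega)
  rw [hres]
  refine ⟨by rw [d1, hXlen], ?_, d3⟩
  exact d2.trans ((r5 v).trans (by rw [pvSet_getD_self hi]))

theorem pvHeapifyAux_spec (l : List Int) :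
    ∀ i, i ≤ l.length / 2 → HeapFrom l i →
    (pvHeapifyAux l i).length = l.length ∧ (pvHeapifyAux l i).Perm l ∧
    IsHeap (pvHeapifyAux l i) := by
  intro i
  induction i generalizing l with
  | zero => intro _ hf; exact ⟨rfl, List.Perm.refl _, hf⟩
  | succ i ih =>
    intro hle hf
    have hi : i < l.length := by omega
    obtain ⟨s1, s2, s3⟩ := pvSiftup_spec l i hi hf
    have : pvHeapifyAux l (i + 1) = pvHeapifyAux (pvSiftup l i) i := rfl
    rw [this]
    obtain ⟨a1, a2, a3⟩ := ih (pvSiftup l i) (by rw [s1]; omega) s3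
    exact ⟨by rw [a1, s1], a2.trans s2, a3⟩

theorem pvHeapify_spec (l : List Int) :
    (pvHeapify l).length = l.length ∧ (pvHeapify l).Perm l ∧ IsHeap (pvHeapify l) := by
  apply pvHeapifyAux_spec l (l.length / 2) (le_refl _)
  intro j hj0 hjn hs'
  omega

theorem pvHeap_head_min (h : List Int) (hh : IsHeap h) :
    ∀ j, j < h.length → h.getD 0 0 ≤ h.getD j 0 := by
  intro j
  induction j using Nat.strong_induction_on with
  | _ j ih =>
    intro hjn
    rcases Nat.eq_zero_or_pos j with rfl | hj0
    · rfl
    · exact le_trans (ih ((j - 1) / 2) (by omega) (by omega)) (hh j hj0 hjn (by omega))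

theorem pvHeappop_spec (h : List Int) (hne : h ≠ []) (hh : IsHeap h) :
    (pvHeappop h).1 = h.getD 0 0 ∧ IsHeap (pvHeappop h).2 ∧
    ((pvHeappop h).1 :: (pvHeappop h).2).Perm h := by
  have hsome : h.getLast? = some (h.getLast hne) := List.getLast?_eq_some_getLast hne
  set last := h.getLast hne with hlastdef
  have hsplit : h.dropLast ++ [last] = h := List.dropLast_concat_getLast hne
  by_cases hrest : h.dropLast.isEmpty
  · have hrest' : h.dropLast = [] := List.isEmpty_iff.mp hrest
    have hh1 : h = [last] := by rw [← hsplit, hrest']; rfl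
    have : pvHeappop h = (last, []) := by
      simp only [pvHeappop, hsome, hrest, if_true]
    rw [this]
    refine ⟨by rw [hh1]; rfl, ?_, by rw [hh1]⟩
    intro j hj0 hjn _
    simp at hjn
  · have hrne : h.dropLast ≠ [] := by
      intro hx; rw [hx] at hrest; simp at hrest
    have hrpos : 0 < h.dropLast.length := List.length_pos_iff.mpr hrne
    have hstep : pvHeappop h = (h.dropLast.getD 0 0, pvSiftup (h.dropLast.set 0 last) 0) := by
      simp only [pvHeappop, hsome, hrest]
      simp
    set l' := h.dropLast.set 0 last with hl'def
    have hl'len : l'.length = h.dropLast.length := List.length_set ..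
    have hdgetD : ∀ k, k < h.dropLast.length → h.dropLast.getD k 0 = h.getD k 0 := by
      intro k hk
      rw [List.getD_eq_getElem?_getD, List.getD_eq_getElem?_getD,
        List.getElem?_eq_getElem hk, List.getElem?_eq_getElem (by
          have := h.length_dropLast; omega)]
      simp [List.getElem_dropLast]
    obtain ⟨s1, s2, s3⟩ := pvSiftup_spec l' 0 (by omega) (by
      intro j hj0 hjn hs'
      rw [hl'len] at hjn
      have hq0 : (j - 1) / 2 ≠ 0 := by omega
      rw [hl'def, pvGetD_set_ne (Ne.symm hq0), pvGetD_set_ne (by omega : (0:Nat) ≠ j),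
        hdgetD _ (by omega), hdgetD _ hjn]
      exact hh j hj0 (by have := h.length_dropLast; omega) (by omega))
    rw [hstep]
    refine ⟨hdgetD 0 hrpos, s3, ?_⟩
    have p1 : (h.dropLast.getD 0 0 :: pvSiftup l' 0).Perm (h.dropLast.getD 0 0 :: l') :=
      s2.cons _
    have p2 : l'.Perm (last :: h.dropLast.eraseIdx 0) :=
      List.set_perm_cons_eraseIdx hrpos last
    have hdl : h.dropLast = h.dropLast.getD 0 0 :: h.dropLast.tail := by
      cases hx : h.dropLast with
      | nil => exact absurd hx hrne
      | cons a t => rfl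
    have p3 : (h.dropLast.getD 0 0 :: last :: h.dropLast.tail).Perm h := by
      have : (last :: h.dropLast.tail).Perm (h.dropLast.tail ++ [last]) :=
        (List.perm_append_singleton last _).symm
      refine (this.cons _).trans ?_
      have : h.dropLast.getD 0 0 :: (h.dropLast.tail ++ [last]) =
          (h.dropLast.getD 0 0 :: h.dropLast.tail) ++ [last] := rfl
      rw [this, ← hdl, hsplit]
    refine p1.trans ?_
    refine (List.Perm.trans ?_ p3)
    have : h.dropLast.eraseIdx 0 = h.dropLast.tail := List.eraseIdx_zero
    rw [this] at p2
    exact p2.cons _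

-- == B-side lemmas ==
theorem pvInsertSorted_perm (xs : List Int) (v : Int) :
    (pvInsertSorted xs v).Perm (v :: xs) := by
  induction xs with
  | nil => simp [pvInsertSorted]
  | cons x t ih =>
    rw [pvInsertSorted]
    split
    · exact (ih.cons x).trans (List.Perm.swap v x t)
    · exact List.Perm.refl _

theorem pvInsertSorted_mem {xs : List Int} {v y : Int} (hy : y ∈ pvInsertSorted xs v) :
    y = v ∨ y ∈ xs := by
  have := (pvInsertSorted_perm xs v).mem_iff.mp hy
  simpa using this

theorem pvInsertSorted_pairwise {xs : List Int} (v : Int)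
    (hs : xs.Pairwise (· ≤ ·)) : (pvInsertSorted xs v).Pairwise (· ≤ ·) := by
  induction xs with
  | nil => simp [pvInsertSorted]
  | cons x t ih =>
    obtain ⟨hx, ht⟩ := List.pairwise_cons.mp hs
    rw [pvInsertSorted]
    split
    · rename_i hlt
      refine List.pairwise_cons.mpr ⟨?_, ih ht⟩
      intro y hy
      rcases pvInsertSorted_mem hy with rfl | hyt
      · exact le_of_lt hlt
      · exact hx y hyt
    · rename_i hge
      refine List.pairwise_cons.mpr ⟨?_, hs⟩
      intro y hy
      rcases List.mem_cons.mp hy with rfl | hyt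
      · omega
      · exact le_trans (by omega) (hx y hyt)

-- the root of a heap and the head of a sorted list are both the minimum
theorem pvHeads_eq (h s : List Int) (hne : h ≠ []) (hh : IsHeap h)
    (hsrt : s.Pairwise (· ≤ ·)) (hperm : h.Perm s) : h.getD 0 0 = s.getD 0 0 := by
  have hsne : s ≠ [] := by
    intro hx; rw [hx] at hperm; exact hne (List.Perm.eq_nil hperm)
  match h, s with
  | a :: h', b :: t =>
    obtain ⟨hb, ht⟩ := List.pairwise_cons.mp hsrt
    show a = b
    have hab : b ≤ a := by
      have ha : a ∈ b :: t := hperm.mem_iff.mp (List.mem_cons_self ..)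
      rcases List.mem_cons.mp ha with rfl | hat
      · rfl
      · exact hb a hat
    have hba : a ≤ b := by
      have hbm : b ∈ a :: h' := hperm.mem_iff.mpr (List.mem_cons_self ..)
      obtain ⟨j, hj, hjb⟩ := List.mem_iff_getElem.mp hbm
      have hminj := pvHeap_head_min (a :: h') hh j hj
      have h2 : (a :: h').getD j 0 = b := by
        rw [List.getD_eq_getElem?_getD, List.getElem?_eq_getElem hj, hjb]; rfl
      rw [h2] at hminj
      exact hminj
    omega

-- == loop equations ==
theorem pvInsertSorted_length (xs : List Int) (v : Int) :
    (pvInsertSorted xs v).length = xs.length + 1 := by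
  induction xs with
  | nil => rfl
  | cons x t ih => rw [pvInsertSorted]; split <;> simp [ih]

theorem pvMainLoopF_congr (f : Nat) : ∀ (f' : Nat) (h : List Int) (K count : Int),
    h.length ≤ f → h.length ≤ f' → pvMainLoopF f h K count = pvMainLoopF f' h K count := by
  induction f with
  | zero =>
    intro f' h K count hf hf'
    cases f' with
    | zero => rfl
    | succ f' =>
      simp only [pvMainLoopF]
      rw [if_neg (show ¬ (1 < h.length ∧ h.getD 0 0 < K) by omega)]
  | succ f ih =>
    intro f' h K count hf hf'
    cases f' with
    | zero =>
      simp only [pvMainLoopF]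
      rw [if_neg (show ¬ (1 < h.length ∧ h.getD 0 0 < K) by omega)]
    | succ f' =>
      simp only [pvMainLoopF]
      by_cases h1 : 1 < h.length ∧ h.getD 0 0 < K
      · rw [if_pos h1, if_pos h1]
        apply ih
        · rw [pvHeappush_length, pvHeappop_length, pvHeappop_length]; omega
        · rw [pvHeappush_length, pvHeappop_length, pvHeappop_length]; omega
      · rw [if_neg h1, if_neg h1]

theorem pvMainLoop_exit (h : List Int) (K count : Int)
    (hx : ¬ (1 < h.length ∧ h.getD 0 0 < K)) :
    pvMainLoop h K count = if h.getD 0 0 ≥ K then count else -1 := by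
  show pvMainLoopF h.length h K count = _
  cases hf : h.length with
  | zero => rfl
  | succ n =>
    simp only [pvMainLoopF]
    rw [if_neg (by rw [hf]; rw [hf] at hx; exact hx)]

theorem pvMainLoop_step (h : List Int) (K count : Int)
    (hx : 1 < h.length ∧ h.getD 0 0 < K) :
    pvMainLoop h K count =
      pvMainLoop (pvHeappush (pvHeappop (pvHeappop h).2).2
        ((pvHeappop h).1 + (pvHeappop (pvHeappop h).2).1 * 2)) K (count + 1) := by
  obtain ⟨n, hn⟩ : ∃ n, h.length = n + 1 := ⟨h.length - 1, by omega⟩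
  show pvMainLoopF h.length h K count = pvMainLoopF _ _ K (count + 1)
  rw [hn]
  simp only [pvMainLoopF]
  rw [if_pos hx]
  apply pvMainLoopF_congr
  · rw [pvHeappush_length, pvHeappop_length, pvHeappop_length]; omega
  · rfl

theorem pvAltLoopF_congr (f : Nat) : ∀ (f' : Nat) (xs : List Int) (K count : Int),
    xs.length ≤ f → xs.length ≤ f' → pvAltLoopF f xs K count = pvAltLoopF f' xs K count := by
  induction f with
  | zero =>
    intro f' xs K count hf hf'
    cases f' with
    | zero => rfl
    | succ f' =>
      simp only [pvAltLoopF]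
      rw [if_neg (show ¬ (1 < xs.length ∧ xs.getD 0 0 < K) by omega)]
  | succ f ih =>
    intro f' xs K count hf hf'
    cases f' with
    | zero =>
      simp only [pvAltLoopF]
      rw [if_neg (show ¬ (1 < xs.length ∧ xs.getD 0 0 < K) by omega)]
    | succ f' =>
      simp only [pvAltLoopF]
      by_cases h1 : 1 < xs.length ∧ xs.getD 0 0 < K
      · rw [if_pos h1, if_pos h1]
        apply ih
        · rw [pvInsertSorted_length]; simp; omega
        · rw [pvInsertSorted_length]; simp; omega
      · rw [if_neg h1, if_neg h1]

theorem pvAltLoop_exit (xs : List Int) (K count : Int)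
    (hx : ¬ (1 < xs.length ∧ xs.getD 0 0 < K)) :
    pvAltLoop xs K count = if xs.getD 0 0 ≥ K then count else -1 := by
  show pvAltLoopF xs.length xs K count = _
  cases hf : xs.length with
  | zero => rfl
  | succ n =>
    simp only [pvAltLoopF]
    rw [if_neg (by rw [hf]; rw [hf] at hx; exact hx)]

theorem pvAltLoop_step (xs : List Int) (K count : Int)
    (hx : 1 < xs.length ∧ xs.getD 0 0 < K) :
    pvAltLoop xs K count =
      pvAltLoop (pvInsertSorted (xs.drop 2) (xs.getD 0 0 + xs.getD 1 0 * 2)) K (count + 1) := by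
  obtain ⟨n, hn⟩ : ∃ n, xs.length = n + 1 := ⟨xs.length - 1, by omega⟩
  show pvAltLoopF xs.length xs K count = pvAltLoopF _ _ K (count + 1)
  rw [hn]
  simp only [pvAltLoopF]
  rw [if_pos hx]
  apply pvAltLoopF_congr
  · rw [pvInsertSorted_length]; simp; omega
  · rfl

-- == the simulation: heap loop ≡ sorted-list loop ==
theorem pvSim (n : Nat) : ∀ (h s : List Int) (K count : Int), h.length ≤ n →
    h.Perm s → IsHeap h → s.Pairwise (· ≤ ·) →
    pvMainLoop h K count = pvAltLoop s K count := by
  induction n with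
  | zero =>
    intro h s K count hn hperm _ _
    have hh : h = [] := List.length_eq_zero_iff.mp (by omega)
    have hs : s = [] := List.Perm.eq_nil (hh ▸ hperm).symm
    subst hh hs
    rw [pvMainLoop_exit _ _ _ (by simp), pvAltLoop_exit _ _ _ (by simp)]
  | succ n ih =>
    intro h s K count hn hperm hh hsrt
    rcases eq_or_ne h ([] : List Int) with rfl | hne
    · have hs : s = [] := List.Perm.eq_nil hperm.symm
      subst hs
      rw [pvMainLoop_exit _ _ _ (by simp), pvAltLoop_exit _ _ _ (by simp)]
    · have hd : h.getD 0 0 = s.getD 0 0 := pvHeads_eq h s hne hh hsrt hperm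
      have hlen : h.length = s.length := hperm.length_eq
      by_cases hg : 1 < h.length ∧ h.getD 0 0 < K
      · have hgs : 1 < s.length ∧ s.getD 0 0 < K := by
          constructor
          · omega
          · rw [← hd]; exact hg.2
        rw [pvMainLoop_step h K count hg, pvAltLoop_step s K count hgs]
        match s, hlen, hperm, hsrt, hgs, hd with
        | s0 :: s1 :: s2, hlen, hperm, hsrt, hgs, hd =>
          obtain ⟨q1a, q1b, q1c⟩ := pvHeappop_spec h hne hh
          have h1len : (pvHeappop h).2.length = h.length - 1 := pvHeappop_length h
          have h1ne : (pvHeappop h).2 ≠ [] := by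
            intro hx
            rw [hx] at h1len
            simp at h1len
            omega
          have hr1 : (pvHeappop h).1 = s0 := by rw [q1a, hd]; rfl
          have hperm1 : (pvHeappop h).2.Perm (s1 :: s2) := by
            have : ((pvHeappop h).1 :: (pvHeappop h).2).Perm (s0 :: s1 :: s2) :=
              q1c.trans hperm
            rw [hr1] at this
            exact this.cons_inv
          have hsrt1 : (s1 :: s2).Pairwise (· ≤ ·) := (List.pairwise_cons.mp hsrt).2
          obtain ⟨q2a, q2b, q2c⟩ := pvHeappop_spec (pvHeappop h).2 h1ne q1b
          have hr2 : (pvHeappop (pvHeappop h).2).1 = s1 := by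
            rw [q2a, pvHeads_eq _ _ h1ne q1b hsrt1 hperm1]; rfl
          have hperm2 : (pvHeappop (pvHeappop h).2).2.Perm s2 := by
            have := q2c.trans hperm1
            rw [hr2] at this
            exact this.cons_inv
          obtain ⟨p1, p2⟩ := pvHeappush_spec (pvHeappop (pvHeappop h).2).2
            ((pvHeappop h).1 + (pvHeappop (pvHeappop h).2).1 * 2) q2b
          have hsrt2 : s2.Pairwise (· ≤ ·) := (List.pairwise_cons.mp hsrt1).2
          have hpushlen : (pvHeappush (pvHeappop (pvHeappop h).2).2
              ((pvHeappop h).1 + (pvHeappop (pvHeappop h).2).1 * 2)).length ≤ n := by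
            rw [pvHeappush_length, pvHeappop_length, pvHeappop_length]
            omega
          have hB : pvInsertSorted ((s0 :: s1 :: s2).drop 2)
              ((s0 :: s1 :: s2).getD 0 0 + (s0 :: s1 :: s2).getD 1 0 * 2) =
              pvInsertSorted s2 (s0 + s1 * 2) := rfl
          rw [hB]
          apply ih _ _ K (count + 1) hpushlen ?_ p2 (pvInsertSorted_pairwise _ hsrt2)
          refine p1.trans ?_
          rw [hr1, hr2]
          exact ((hperm2.cons _).trans (pvInsertSorted_perm s2 (s0 + s1 * 2)).symm)
      · have hgs : ¬ (1 < s.length ∧ s.getD 0 0 < K) := by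
          rw [← hlen, ← hd]
          exact hg
        rw [pvMainLoop_exit _ _ _ hg, pvAltLoop_exit _ _ _ hgs, hd]

-- ===== VERDICT (by name: the statement is the Claim_ definition above) =====
theorem solution_spec : Claim_equal_solution := by
  intro scoville K _hdom _hpre
  unfold Spec_solution solution solution_alt
  obtain ⟨h1, h2, h3⟩ := pvHeapify_spec scoville
  apply pvSim (pvHeapify scoville).length _ _ K 0 (le_refl _) ?_ h3 ?_
  · exact h2.trans (PySem.List.sorted_perm scoville (fun x => x) false).symm
  · simpa using PySem.List.sorted_pairwise scoville (fun x => x)
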